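-- pv_equiv track=rewrite | github.com/young0264/hellopycharm | 2024_토스_상반기_서버/3번.py | solution
-- ===== SOURCE A (Python) =====
-- def solution(amountText):
--     answer = True  # return : boolean
--
--     # 옳은 금액 : ','으로만 이루어져 있는 문자, 구분자 없어도 옳은 문자,
--     #   오른쪽에서 시작햇을 때 세자리 구분자가 성립해야함
--     # 옳지 않은 금액 : '원', '왼쪽에 0 없어야',
--
--     def is_valid_amount_basic(amount):
--         if set(amount) == {','}:
--             return False
--
--         if '원' in amount:
--             return False
--
--         if amount.startswith('0'):
--             return False
--
--         if amount.startswith(','):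
--             return False
--
--         if amount.endswith(','):
--             return False
--
--         return True
--
--     def is_valid_amount_three_sep(amount):
--         flag = False
--         if ',' in amount:
--             if len(amount) < 5:
--                 return False
--             # flag = True # , 가 포함되어 있는 amount
--             for i in range(-1, -len(amount) - 1, -1):
--                 if amount[i] == ',':
--                     if ((-1 * i) % 4 != 0):
--                         return False
--                 if ((-1 * i) % 4) == 0:
--                     if amount[i] != ',':
--                         return False
--
--         return True
--
--     def is_valid_chracters(amount):
--         valid_characters = set('0123456789,')
--         for c in amount:
--             if c not in valid_characters:
--                 return False
--         return True
--
--     if amountText == "0":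
--         return True
--     if is_valid_amount_three_sep(amountText) == False or is_valid_amount_basic(
--             amountText) == False or is_valid_chracters(amountText) == False:
--         answer = False
--
--     return answer
-- ===== SOURCE B (Python) =====
-- def solution(amountText):
--     if amountText == "0":
--         return True
--     if any(c not in '0123456789,' for c in amountText):
--         return False
--     if amountText.startswith('0') or amountText.startswith(',') or amountText.endswith(','):
--         return False
--     if ',' in amountText:
--         groups = amountText.split(',')
--         if not (1 <= len(groups[0]) <= 3):
--             return False
--         if any(len(g) != 3 for g in groups[1:]):
--             return False
--     return True
-- ===== Notes on version B (the rewrite author's own statement) =====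
-- stated objective: simpler
-- what changed: A validates the thousands grouping with an index loop from the right that checks a comma at exactly every position that is a multiple of 4 (plus a separate all-commas set test and a minimum-length-5 test); B instead splits the string on the comma separator once and checks that the first group has length 1-3 and every later group has length exactly 3, which subsumes A's extra tests.
import Mathlib
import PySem

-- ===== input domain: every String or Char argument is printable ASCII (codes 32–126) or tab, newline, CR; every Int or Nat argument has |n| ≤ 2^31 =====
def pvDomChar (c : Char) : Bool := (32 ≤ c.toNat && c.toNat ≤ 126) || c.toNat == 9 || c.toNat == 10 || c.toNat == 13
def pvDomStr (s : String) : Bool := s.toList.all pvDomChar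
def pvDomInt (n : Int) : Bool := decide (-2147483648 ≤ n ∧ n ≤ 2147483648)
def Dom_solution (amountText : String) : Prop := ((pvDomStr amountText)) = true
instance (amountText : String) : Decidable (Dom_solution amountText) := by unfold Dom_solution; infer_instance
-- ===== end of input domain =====

-- B validates the grouping by splitting on ',' and checking group lengths instead of A's
-- per-index modular scan from the right; objective: simpler.

-- ===== PORT A =====
-- is_valid_amount_basic
def pvBasicA (amount : String) : Bool :=
  if PySem.Set.equal (PySem.Set.ofList amount.toList) (PySem.Set.ofList [',']) then false
  else if PySem.Str.isIn "원" amount then false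
  else if PySem.Str.startswith amount "0" then false
  else if PySem.Str.startswith amount "," then false
  else if PySem.Str.endswith amount "," then false
  else true

-- the `for i in range(-1, -len(amount) - 1, -1)` loop body of is_valid_amount_three_sep
def pvThreeSepLoopA (amount : List Char) : List Int → Bool
  | [] => true
  | i :: rest =>
    match PySem.List.pyGet? amount i with
    | none => false  -- IndexError; never reached: every loop index is in range
    | some c =>
      if c = ',' ∧ PySem.Int.mod (-1 * i) 4 ≠ 0 then false
      else if PySem.Int.mod (-1 * i) 4 = 0 ∧ c ≠ ',' then false
      else pvThreeSepLoopA amount rest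

-- is_valid_amount_three_sep
def pvThreeSepA (amount : String) : Bool :=
  if PySem.Str.isIn "," amount then
    if amount.toList.length < 5 then false
    else pvThreeSepLoopA amount.toList
      (PySem.List.pyRange (-1) (-(amount.toList.length : Int) - 1) (-1))
  else true

-- the `for c in amount` loop of is_valid_chracters
def pvCharsLoopA (valid : PySem.Set Char) : List Char → Bool
  | [] => true
  | c :: rest => if ¬ PySem.Set.contains valid c then false else pvCharsLoopA valid rest

-- is_valid_chracters
def pvCharsA (amount : String) : Bool :=
  pvCharsLoopA (PySem.Set.ofList "0123456789,".toList) amount.toList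

def solution (amountText : String) : Bool :=
  if amountText == "0" then true
  else if pvThreeSepA amountText = false ∨ pvBasicA amountText = false
          ∨ pvCharsA amountText = false then false
  else true

-- ===== PORT B =====
def solution_alt (amountText : String) : Bool :=
  if amountText == "0" then true
  else if amountText.toList.any (fun c => !("0123456789,".toList.contains c)) then false
  else if PySem.Str.startswith amountText "0" || PySem.Str.startswith amountText ","
          || PySem.Str.endswith amountText "," then false
  else if PySem.Str.isIn "," amountText then
    -- groups = amountText.split(',')  (list.split(',') ported as Mathlib's List.splitOn)
    match List.splitOn ',' amountText.toList with
    | [] => false  -- unreachable: split() never returns an empty list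
    | g0 :: rest =>
      if ¬ (1 ≤ g0.length ∧ g0.length ≤ 3) then false
      else if rest.any (fun g => g.length ≠ 3) then false
      else true
  else true

-- ===== PRECONDITION & SPEC =====
def Spec_solution (amountText : String) (out : Bool) : Prop := out = solution_alt amountText
instance (amountText : String) (out : Bool) : Decidable (Spec_solution amountText out) := by unfold Spec_solution; infer_instance

-- ===== CLAIM (what is proved, stated in full; the proofs are below) =====
def Claim_equal_solution : Prop := ∀ (amountText : String), Dom_solution amountText → Spec_solution amountText (solution amountText)

-- ===== LEMMAS AND PROOFS =====
theorem splitOn_comma_free (l : List Char) : ∀ g ∈ List.splitOn ',' l, ',' ∉ g := by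
  induction l with
  | nil => simp [List.splitOn, List.splitOnP_nil]
  | cons c t ih =>
    rw [List.splitOn, List.splitOnP_cons]
    rw [List.splitOn] at ih
    by_cases hc : c = ','
    · simpa [hc] using fun g hg => ih g hg
    · rcases h : List.splitOnP (fun x => x == ',') t with _ | ⟨h0, hs⟩
      · exact absurd h (List.splitOnP_ne_nil _ t)
      · rw [h] at ih
        simp only [hc, beq_iff_eq, if_false, List.modifyHead]
        intro g hg
        rcases List.mem_cons.1 hg with rfl | hmem
        · have := ih h0 (by simp)
          simp only [List.mem_cons]
          rintro (rfl | hmem2)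
          · exact hc rfl
          · exact this hmem2
        · exact ih g (List.mem_cons_of_mem _ hmem)

def QProp (l : List Char) : Prop :=
  ∀ k : Nat, 1 ≤ k → k ≤ l.length → (l[l.length - k]? = some ',' ↔ 4 ∣ k)

theorem Q_noComma (g : List Char) (hg : ',' ∉ g) : QProp g ↔ g.length ≤ 3 := by
  unfold QProp
  constructor
  · intro h
    by_contra hlen
    push Not at hlen
    have h4 := h 4 (by omega) (by omega)
    have : g[g.length - 4]? = some ',' := h4.mpr (by omega)
    have hm : ',' ∈ g := by
      have := List.mem_of_getElem? this
      exact this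
    exact hg hm
  · intro hlen k hk1 hk2
    constructor
    · intro hc
      exact absurd (List.mem_of_getElem? hc) hg
    · intro hdvd
      omega
theorem Q_append (g t : List Char) (hg : ',' ∉ g) :
    QProp (g ++ ',' :: t) ↔
      QProp t ∧ 4 ∣ (t.length + 1) ∧
        (∀ k : Nat, t.length + 2 ≤ k → k ≤ g.length + 1 + t.length → ¬ 4 ∣ k) := by
  have hlen : (g ++ ',' :: t).length = g.length + 1 + t.length := by simp; omega
  constructor
  · intro h
    refine ⟨?_, ?_, ?_⟩
    · intro k hk1 hk2
      have := h k hk1 (by omega)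
      rw [hlen] at this
      rwa [show g.length + 1 + t.length - k = g.length + 1 + (t.length - k) by omega,
        List.getElem?_append_right (by omega),
        show g.length + 1 + (t.length - k) - g.length = (t.length - k) + 1 by omega,
        List.getElem?_cons_succ] at this
    · have := h (t.length + 1) (by omega) (by omega)
      rw [hlen] at this
      rw [show g.length + 1 + t.length - (t.length + 1) = g.length by omega,
        List.getElem?_append_right (by omega)] at this
      simp at this
      exact this
    · intro k hk1 hk2 hdvd
      have := h k (by omega) (by omega)
      rw [hlen] at this
      rw [List.getElem?_append_left (by omega)] at this
      have hc := this.mpr hdvd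
      exact hg (List.mem_of_getElem? hc)
  · rintro ⟨hq, hdvd, hint⟩ k hk1 hk2
    rw [hlen] at hk2 ⊢
    rcases lt_trichotomy k (t.length + 1) with hlt | heq | hgt
    · rw [show g.length + 1 + t.length - k = g.length + 1 + (t.length - k) by omega,
        List.getElem?_append_right (by omega),
        show g.length + 1 + (t.length - k) - g.length = (t.length - k) + 1 by omega,
        List.getElem?_cons_succ]
      exact hq k hk1 (by omega)
    · subst heq
      rw [show g.length + 1 + t.length - (t.length + 1) = g.length by omega,
        List.getElem?_append_right (by omega)]
      simpa using hdvd
    · rw [List.getElem?_append_left (by omega)]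
      constructor
      · intro hc; exact absurd (List.mem_of_getElem? hc) hg
      · intro hd; exact absurd hd (hint k (by omega) (by omega))

theorem intercalate_cons2 (a : Char) (l m : List Char) (t : List (List Char)) :
    List.intercalate [a] (l :: m :: t) = l ++ a :: List.intercalate [a] (m :: t) := by
  simp [List.intercalate, List.intersperse]

theorem len_inter3 (h : List Char) (hs : List (List Char))
    (h3 : ∀ x ∈ hs, x.length = 3) :
    (List.intercalate [','] (h :: hs)).length = h.length + 4 * hs.length := by
  induction hs generalizing h with
  | nil => simp [List.intercalate]
  | cons h1 hs' ih =>
    rw [intercalate_cons2]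
    have := ih h1 (fun x hx => h3 x (List.mem_cons_of_mem _ hx))
    simp only [List.length_append, List.length_cons, this,
      h3 h1 (by simp), List.length_cons]
    omega

theorem Q_intercalate (g : List Char) (hs : List (List Char)) (hg : ',' ∉ g)
    (hhs : ∀ h ∈ hs, ',' ∉ h) :
    QProp (List.intercalate [','] (g :: hs)) ↔
      ((∀ h ∈ hs, h.length = 3) ∧ g.length ≤ 3) := by
  induction hs generalizing g with
  | nil =>
    simp only [List.intercalate]
    simpa using Q_noComma g hg
  | cons h1 hs' ih =>
    rw [intercalate_cons2, Q_append _ _ hg]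
    have ih1 := ih h1 (hhs h1 (by simp)) (fun x hx => hhs x (List.mem_cons_of_mem _ hx))
    rw [ih1]
    set t := List.intercalate [','] (h1 :: hs') with ht
    constructor
    · rintro ⟨⟨all3', hh1⟩, hdvd, hint⟩
      have hlt : t.length = h1.length + 4 * hs'.length := len_inter3 h1 hs' all3'
      have hh13 : h1.length = 3 := by omega
      refine ⟨?_, ?_⟩
      · intro h hm
        rcases List.mem_cons.1 hm with rfl | hm'
        · exact hh13
        · exact all3' h hm'
      · by_contra hglen
        push Not at hglen
        exact hint (t.length + 5) (by omega) (by omega) (by omega)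
    · rintro ⟨all3, hglen⟩
      have all3' : ∀ x ∈ hs', x.length = 3 := fun x hx => all3 x (List.mem_cons_of_mem _ hx)
      have hlt : t.length = h1.length + 4 * hs'.length := len_inter3 h1 hs' all3'
      have hh13 : h1.length = 3 := all3 h1 (by simp)
      refine ⟨⟨all3', by omega⟩, by omega, ?_⟩
      intro k hk1 hk2 hdvd
      omega

theorem range_eq (n : Nat) :
    PySem.List.pyRange (-1) (-(n:Int) - 1) (-1) = (List.range n).map (fun k : Nat => -1 - (k:Int)) := by
  simp only [PySem.List.pyRange]
  rcases Nat.eq_zero_or_pos n with rfl | hn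
  · simp
  · rw [if_neg (by norm_num), if_neg (by norm_num), if_pos (by omega)]
    have h1 : ((-1 : Int) - (-(n:Int) - 1) + -(-1) - 1) / -(-1) = (n : Int) := by push_cast; ring_nf; exact Int.ediv_one _ ▸ rfl
    rw [h1, Int.toNat_natCast]
    show List.map (fun k : Nat => -1 + -1 * (k:Int)) (List.range n)
        = List.map (fun k : Nat => -1 - (k:Int)) (List.range n)
    apply List.map_congr_left
    intro k hk
    omega

theorem pyGet_neg (l : List Char) (k : Nat) (h : k < l.length) :
    PySem.List.pyGet? l (-1 - (k:Int)) = l[l.length - (k+1)]? := by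
  simp only [PySem.List.pyGet?, PySem.List.pyIdx?]
  rw [if_neg (by omega), if_pos (by omega)]
  simp only [Option.bind_some]
  congr 1
  omega

theorem loopA_iff (l : List Char) (ks : List Nat) (hk : ∀ k ∈ ks, k < l.length) :
    pvThreeSepLoopA l (ks.map (fun k : Nat => -1 - (k:Int))) = true ↔
      (∀ k ∈ ks, (l[l.length - (k+1)]? = some ',' ↔ 4 ∣ (k+1))) := by
  induction ks with
  | nil => simp [pvThreeSepLoopA]
  | cons k ks' ih =>
    have hklt : k < l.length := hk k (by simp)
    have hget := pyGet_neg l k hklt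
    have hsome : ∃ c, l[l.length - (k+1)]? = some c :=
      ⟨_, List.getElem?_eq_getElem (by omega)⟩
    obtain ⟨c, hc⟩ := hsome
    have hmod : PySem.Int.mod (-1 * (-1 - (k:Int))) 4 = (((k+1) % 4 : Nat) : Int) := by
      rw [show (-1 * (-1 - (k:Int))) = (((k+1 : Nat)) : Int) by push_cast; ring]
      exact PySem.Int.mod_natCast (k+1) 4
    rw [List.map_cons]
    simp only [pvThreeSepLoopA]
    rw [hget, hc]
    have ihh := ih (fun x hx => hk x (List.mem_cons_of_mem _ hx))
    rw [hmod]
    simp only [List.forall_mem_cons, hc]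
    have hd : ((((k+1) % 4 : Nat)) : Int) = 0 ↔ 4 ∣ (k+1) := by
      rw [Nat.cast_eq_zero]
      exact Nat.dvd_iff_mod_eq_zero.symm
    have hdInt : ((4:Int) ∣ ((k:Int)+1)) ↔ 4 ∣ (k+1) := by exact_mod_cast Iff.rfl
    by_cases hdvd : 4 ∣ (k+1) <;> by_cases hcc : c = ',' <;>
      simp [hcc, hdvd, hdInt, ihh]

theorem isIn_comma (s : String) : PySem.Str.isIn "," s = decide (',' ∈ s.toList) := by
  rw [Bool.eq_iff_iff, decide_eq_true_iff, PySem.Str.isIn_iff_infix]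
  show [','] <:+: s.toList ↔ _
  exact List.singleton_infix_iff _ _

theorem forall_range_shift (n : Nat) (P : Nat → Prop) :
    (∀ j ∈ List.range n, P (j+1)) ↔ (∀ k, 1 ≤ k → k ≤ n → P k) := by
  constructor
  · intro h k h1 h2
    obtain ⟨j, rfl⟩ : ∃ j, k = j + 1 := ⟨k - 1, by omega⟩
    exact h j (List.mem_range.2 (by omega))
  · intro h j hj
    exact h (j+1) (by omega) (by simpa using List.mem_range.1 hj)

theorem threeSepA_iff (s : String) (hc : ',' ∈ s.toList) :
    (pvThreeSepA s = true ↔ (5 ≤ s.toList.length ∧ QProp s.toList)) := by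
  unfold pvThreeSepA
  rw [isIn_comma, if_pos (by simpa using hc)]
  by_cases hlen : s.toList.length < 5
  · rw [if_pos hlen]
    simp only [Bool.false_eq_true, false_iff]
    exact fun h => absurd h.1 (by omega)
  · rw [if_neg hlen, range_eq, loopA_iff _ _ (fun k hk => List.mem_range.1 hk)]
    rw [forall_range_shift s.toList.length (fun k => (s.toList[s.toList.length - k]? = some ',' ↔ 4 ∣ k))]
    unfold QProp
    constructor
    · exact fun h => ⟨by omega, h⟩
    · exact fun h => h.2

theorem charsLoopA_eq (v : List Char) (l : List Char) :
    pvCharsLoopA (PySem.Set.ofList v) l = !(l.any fun c => !(v.contains c)) := by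
  induction l with
  | nil => simp [pvCharsLoopA]
  | cons c t ih =>
    simp only [pvCharsLoopA, List.any_cons]
    have hcv : PySem.Set.contains (PySem.Set.ofList v) c = v.contains c := by simp [pysem]
    rw [hcv]
    by_cases h : c ∈ v
    · simp [h, ih]
    · simp [h]


theorem charsA_eq (s : String) :
    pvCharsA s = !(s.toList.any (fun c => !("0123456789,".toList.contains c))) := by
  unfold pvCharsA
  exact charsLoopA_eq _ _

theorem intercalate_single (a : Char) (l : List Char) :
    List.intercalate [a] ([l]) = l := by
  simp [List.intercalate]

theorem startswith_comma (s : String) :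
    PySem.Str.startswith s "," = [','].isPrefixOf s.toList := by
  simp [pysem, PySem.Chars.startswith]

theorem pvBasicA_false (s : String)
    (h : PySem.Str.startswith s "0" = true ∨ PySem.Str.startswith s "," = true
        ∨ PySem.Str.endswith s "," = true) :
    pvBasicA s = false := by
  unfold pvBasicA
  split_ifs <;> simp_all

theorem main_eq (s : String) : solution s = solution_alt s := by
  unfold solution solution_alt
  by_cases h0 : (s == "0") = true
  · rw [if_pos h0, if_pos h0]
  · rw [if_neg h0, if_neg h0]
    by_cases hbad : (s.toList.any (fun c => !("0123456789,".toList.contains c))) = true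
    · have hch : pvCharsA s = false := by
        rw [charsA_eq, hbad]; rfl
      rw [if_pos hbad, if_pos (Or.inr (Or.inr hch))]
    · have hch : pvCharsA s = true := by
        rw [charsA_eq]
        rw [Bool.eq_false_iff.2 hbad]
        rfl
      have hval : ∀ c ∈ s.toList, c ∈ "0123456789,".toList := by
        intro c hcmem
        by_contra hnc
        exact hbad (List.any_eq_true.2 ⟨c, hcmem, by simpa using hnc⟩)
      have hwon : PySem.Str.isIn "원" s = false := by
        rw [PySem.Str.isIn_eq]
        apply (PySem.Chars.isIn_eq_false_iff _ _).2
        rw [show ("원" : String).toList = ['원'] from rfl, List.singleton_infix_iff]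
        intro hmem
        have := hval _ hmem
        simp at this
      rw [if_neg hbad]
      by_cases hpre : (PySem.Str.startswith s "0" || PySem.Str.startswith s ","
          || PySem.Str.endswith s ",") = true
      · rw [if_pos hpre]
        have hb : pvBasicA s = false := pvBasicA_false s (by
          simp only [Bool.or_eq_true] at hpre
          tauto)
        rw [if_pos (Or.inr (Or.inl hb))]
      · rw [if_neg hpre]
        rw [Bool.not_eq_true, Bool.or_eq_false_iff, Bool.or_eq_false_iff] at hpre
        obtain ⟨⟨hsw0, hswc⟩, hewc⟩ := hpre
        have heq : PySem.Set.equal (PySem.Set.ofList s.toList) (PySem.Set.ofList [',']) = false := by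
          rw [Bool.eq_false_iff]
          intro hq
          unfold PySem.Set.equal at hq
          rw [Bool.and_eq_true, PySem.Set.issubset_iff, PySem.Set.issubset_iff] at hq
          have hall : ∀ x ∈ s.toList, x = ',' := by
            intro x hx
            have := hq.1 x (by rw [PySem.Set.mem_ofList]; exact hx)
            simpa [PySem.Set.mem_ofList] using this
          have hmm : ',' ∈ s.toList := by
            have := hq.2 ',' (by simp [PySem.Set.mem_ofList])
            simpa [PySem.Set.mem_ofList] using this
          rw [startswith_comma] at hswc
          obtain ⟨c, t, hls⟩ := List.exists_cons_of_ne_nil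
            (show s.toList ≠ [] by rintro h; rw [h] at hmm; simp at hmm)
          rw [hls] at hswc hall
          have : c = ',' := hall c (by simp)
          subst this
          simp [List.isPrefixOf] at hswc
        have hbasic : pvBasicA s = true := by
          unfold pvBasicA
          simp only [heq, hwon, hsw0, hswc, hewc, Bool.false_eq_true, if_false]
        rw [hbasic, hch]
        rw [if_congr (show (pvThreeSepA s = false ∨ true = false ∨ true = false) ↔
          (pvThreeSepA s = false) by simp) rfl rfl]
        rw [isIn_comma]
        by_cases hcin : ',' ∈ s.toList
        · rw [if_pos (show decide (',' ∈ s.toList) = true by simpa using hcin)]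
          have hfree := splitOn_comma_free s.toList
          have hint := List.intercalate_splitOn s.toList ','
          rcases hgs : List.splitOn ',' s.toList with _ | ⟨g0, rest⟩
          · exfalso
            rw [hgs, show List.intercalate [','] ([] : List (List Char)) = [] from rfl] at hint
            rw [← hint] at hcin
            simp at hcin
          · rcases rest with _ | ⟨h1, rest'⟩
            · exfalso
              rw [hgs] at hint hfree
              rw [intercalate_single] at hint
              rw [← hint] at hcin
              exact hfree g0 (by simp) hcin
            · rw [hgs] at hint hfree
              have hg0len : 1 ≤ g0.length := by
                rcases g0 with _ | ⟨c0, t0⟩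
                · exfalso
                  rw [startswith_comma] at hswc
                  rw [intercalate_cons2] at hint
                  rw [← hint] at hswc
                  simp [List.isPrefixOf] at hswc
                · simp
              have hQ : QProp s.toList ↔ ((∀ h ∈ h1 :: rest', h.length = 3) ∧ g0.length ≤ 3) := by
                conv_lhs => rw [← hint]
                exact Q_intercalate g0 (h1 :: rest') (hfree g0 (by simp))
                  (fun h hm => hfree h (List.mem_cons_of_mem _ hm))
              have hA := threeSepA_iff s hcin
              dsimp only
              by_cases hall : (∀ h ∈ h1 :: rest', h.length = 3) ∧ g0.length ≤ 3
              · have hq := hQ.mpr hall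
                have hn : 5 ≤ s.toList.length := by
                  rw [← hint, intercalate_cons2]
                  have hlt := len_inter3 h1 rest' (fun x hx => hall.1 x (List.mem_cons_of_mem _ hx))
                  have h13 : h1.length = 3 := hall.1 h1 (by simp)
                  simp only [List.length_append, List.length_cons, hlt]
                  omega
                rw [hA.mpr ⟨hn, hq⟩, if_neg (show ¬(true = false) by simp)]
                have hany : ((h1 :: rest').any (fun g => g.length ≠ 3)) = false := by
                  rw [Bool.eq_false_iff]
                  intro ha
                  obtain ⟨g, hgm, hgl⟩ := List.any_eq_true.1 ha
                  exact absurd (hall.1 g hgm) (by simpa using hgl)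
                rw [if_neg (not_not_intro (show 1 ≤ g0.length ∧ g0.length ≤ 3 from ⟨hg0len, hall.2⟩))]
                rw [hany]
                simp
              · have hts : pvThreeSepA s = false := by
                  rw [Bool.eq_false_iff]
                  intro ht
                  exact hall (hQ.mp (hA.mp ht).2)
                rw [hts, if_pos rfl]
                by_cases hg3 : g0.length ≤ 3
                · have hex : ∃ g ∈ h1 :: rest', g.length ≠ 3 := by
                    by_contra hno
                    push Not at hno
                    exact hall ⟨hno, hg3⟩
                  obtain ⟨g, hgm, hgl⟩ := hex
                  rw [if_neg (not_not_intro ⟨hg0len, hg3⟩),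
                    if_pos (List.any_eq_true.2 ⟨g, hgm, by simpa using hgl⟩)]
                · rw [if_pos (by intro hcontra; exact hg3 hcontra.2)]
        · have hts : pvThreeSepA s = true := by
            unfold pvThreeSepA
            rw [isIn_comma, if_neg (show ¬(decide (',' ∈ s.toList) = true) by simpa using hcin)]
          rw [hts, if_neg (show ¬(decide (',' ∈ s.toList) = true) by simpa using hcin),
            if_neg (show ¬(true = false) by simp)]

-- ===== VERDICT (by name: the statement is the Claim_ definition above) =====
theorem solution_spec : Claim_equal_solution := by
  intro amountText _hdom
  exact main_eq amountText
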